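-- pv_equiv track=rewrite | github.com/bharadwaj21122001/DSA_Practice | row_max1's.py | first_ones
-- ===== SOURCE A (Python) =====
-- def first_ones(row):
--         low = 0
--         high = len(row) - 1
--
--         while low <= high:
--             mid = (low + high) // 2
--
--             if row[mid] == 1:
--                 if mid == 0 or row[mid - 1] == 0:
--                     return mid
--                 else:
--                     high = mid - 1
--             else:
--                 low = mid + 1
--         return -1
-- ===== SOURCE B (Python) =====
-- def first_ones(row):
--     def go(low, high):
--         if high < low:
--             return -1
--         mid = (low + high) // 2
--         if row[mid] != 1:
--             return go(mid + 1, high)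
--         if mid == 0:
--             return mid
--         if row[mid - 1] == 0:
--             return mid
--         return go(low, mid - 1)
--     return go(0, len(row) - 1)
-- ===== Notes on version B (the rewrite author's own statement) =====
-- stated objective: alternative
-- what changed: The iterative while-loop binary search is re-decomposed as a recursive inner helper with inverted guard order and early returns (guard clauses instead of nested if/else), preserving the exact probe sequence.
import Mathlib
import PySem

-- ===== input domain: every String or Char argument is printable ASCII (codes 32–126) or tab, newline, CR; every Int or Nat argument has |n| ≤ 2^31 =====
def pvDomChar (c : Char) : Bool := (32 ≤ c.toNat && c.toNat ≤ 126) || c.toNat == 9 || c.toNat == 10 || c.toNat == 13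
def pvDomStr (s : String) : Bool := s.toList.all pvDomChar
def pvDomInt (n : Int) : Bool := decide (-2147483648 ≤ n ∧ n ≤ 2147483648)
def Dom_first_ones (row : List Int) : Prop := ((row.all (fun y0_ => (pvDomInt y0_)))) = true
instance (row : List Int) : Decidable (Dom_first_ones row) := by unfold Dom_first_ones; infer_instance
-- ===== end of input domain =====

-- B re-decomposes A's iterative binary search as a recursive helper with guard clauses; same probe sequence, return value proved equal.


-- ===== PORT A =====
-- while-loop of A as structural recursion on the interval width; row[mid] via pyGet?
-- (indices probed by the loop are always in range, so .getD 0 is exact)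
def firstOnesLoop (row : List Int) (low high : Int) : Int :=
  if h : low ≤ high then
    let mid := PySem.Int.floordiv (low + high) 2
    if (PySem.List.pyGet? row mid).getD 0 = 1 then
      if mid = 0 ∨ (PySem.List.pyGet? row (mid - 1)).getD 0 = 0 then mid
      else firstOnesLoop row low (mid - 1)
    else firstOnesLoop row (mid + 1) high
  else -1
termination_by (high + 1 - low).toNat
decreasing_by
  all_goals have := PySem.Int.floordiv_two_mid_bounds h
  all_goals omega

def first_ones (row : List Int) : Int :=
  firstOnesLoop row 0 ((row.length : Int) - 1)

-- ===== PORT B =====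
def firstOnesGo (row : List Int) (low high : Int) : Int :=
  if h : high < low then -1
  else if (PySem.List.pyGet? row (PySem.Int.floordiv (low + high) 2)).getD 0 ≠ 1 then
    firstOnesGo row (PySem.Int.floordiv (low + high) 2 + 1) high
  else if PySem.Int.floordiv (low + high) 2 = 0 then PySem.Int.floordiv (low + high) 2
  else if (PySem.List.pyGet? row (PySem.Int.floordiv (low + high) 2 - 1)).getD 0 = 0 then
    PySem.Int.floordiv (low + high) 2
  else firstOnesGo row low (PySem.Int.floordiv (low + high) 2 - 1)
termination_by (high + 1 - low).toNat
decreasing_by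
  all_goals have := PySem.Int.floordiv_two_mid_bounds (show low ≤ high by omega)
  all_goals omega

def first_ones_alt (row : List Int) : Int :=
  firstOnesGo row 0 ((row.length : Int) - 1)

-- ===== PRECONDITION & SPEC =====
def Spec_first_ones (row : List Int) (out : Int) : Prop := out = first_ones_alt row
instance (row : List Int) (out : Int) : Decidable (Spec_first_ones row out) := by unfold Spec_first_ones; infer_instance

-- ===== CLAIM (what is proved, stated in full; the proofs are below) =====
def Claim_equal_first_ones : Prop := ∀ (row : List Int), Dom_first_ones row → Spec_first_ones row (first_ones row)

-- ===== LEMMAS AND PROOFS =====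
theorem firstOnesLoop_eq_go (row : List Int) (low high : Int) :
    firstOnesLoop row low high = firstOnesGo row low high := by
  fun_induction firstOnesLoop row low high with
  | case1 low high h mid h1 h2 =>
      rw [firstOnesGo, dif_neg (show ¬ high < low by omega)]
      simp only [mid] at h1 h2 ⊢
      rw [PySem.Int.floordiv_eq_ediv_of_pos (by norm_num : (0:Int) < 2)] at h1 h2 ⊢
      rcases h2 with h2 | h2
      · rw [h2] at h1 ⊢; simp [h1]
      · by_cases hm : (low + high) / 2 = 0
        · rw [hm] at h1 h2 ⊢; simp [h1]
        · simp [h1, h2, hm]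
  | case2 low high h mid h1 h2 ih =>
      rw [firstOnesGo, dif_neg (show ¬ high < low by omega)]
      rw [not_or] at h2
      simp only [mid] at h1 h2 ih ⊢
      rw [PySem.Int.floordiv_eq_ediv_of_pos (by norm_num : (0:Int) < 2)] at h1 h2 ih ⊢
      simp [h1, h2.1, h2.2, ih]
  | case3 low high h mid h1 ih =>
      rw [firstOnesGo, dif_neg (show ¬ high < low by omega)]
      simp only [mid] at h1 ih ⊢
      rw [PySem.Int.floordiv_eq_ediv_of_pos (by norm_num : (0:Int) < 2)] at h1 ih ⊢
      simp [h1, ih]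
  | case4 low high h =>
      rw [firstOnesGo]
      simp [show high < low by omega]

-- ===== VERDICT (by name: the statement is the Claim_ definition above) =====
theorem first_ones_spec : Claim_equal_first_ones := by
  intro row _
  unfold Spec_first_ones first_ones first_ones_alt
  exact firstOnesLoop_eq_go row 0 ((row.length : Int) - 1)
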